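-- pv_equiv track=rewrite | github.com/verajack/soccerguru | get_stats.py | calculate_points
-- ===== SOURCE A (Python) =====
-- def calculate_points(form):
--     points = 0
--     for result in form:
--         if result == 'W':
--             points += 3
--         elif result == 'D':
--             points += 1
--         # Loss (L) contributes 0 points, so we skip it
--     return points
-- ===== SOURCE B (Python) =====
-- def calculate_points(form):
--     freq = {}
--     for result in form:
--         freq[result] = freq.get(result, 0) + 1
--     return 3 * freq.get('W', 0) + freq.get('D', 0)
-- ===== Notes on version B (the rewrite author's own statement) =====
-- stated objective: alternative
-- what changed: Instead of branching on each result inside the loop, B builds a frequency histogram (dict) in one branch-free pass and then computes the score arithmetically from the 'W' and 'D' counts.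
import Mathlib
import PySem

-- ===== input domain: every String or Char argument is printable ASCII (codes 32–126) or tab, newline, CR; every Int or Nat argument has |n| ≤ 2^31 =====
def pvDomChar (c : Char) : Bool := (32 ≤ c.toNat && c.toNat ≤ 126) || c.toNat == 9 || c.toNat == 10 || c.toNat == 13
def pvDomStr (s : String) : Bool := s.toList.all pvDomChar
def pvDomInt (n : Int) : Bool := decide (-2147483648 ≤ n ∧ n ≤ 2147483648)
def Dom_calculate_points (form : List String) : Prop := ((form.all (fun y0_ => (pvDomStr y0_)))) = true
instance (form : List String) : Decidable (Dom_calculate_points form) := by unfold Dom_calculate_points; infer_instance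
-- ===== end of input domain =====

-- B builds a frequency histogram in one branch-free pass and scores it afterwards, instead of A's if/elif accumulator loop.

-- ===== PORT A =====
def calculate_points (form : List String) : Int :=
  form.foldl (fun points result =>
    if result == "W" then points + 3
    else if result == "D" then points + 1
    else points) 0

-- ===== PORT B =====
def calculate_points_alt (form : List String) : Int :=
  let freq := form.foldl (fun d r => d.insert r (d.getD r 0 + 1)) PySem.Dict.empty
  3 * freq.getD "W" 0 + freq.getD "D" 0

-- ===== PRECONDITION & SPEC =====
def Spec_calculate_points (form : List String) (out : Int) : Prop := out = calculate_points_alt form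
instance (form : List String) (out : Int) : Decidable (Spec_calculate_points form out) := by unfold Spec_calculate_points; infer_instance

-- ===== CLAIM =====
def Claim_equal_calculate_points : Prop := ∀ (form : List String), Dom_calculate_points form → Spec_calculate_points form (calculate_points form)

-- ===== LEMMAS AND PROOFS =====
lemma calc_foldl (form : List String) (a : Int) :
    form.foldl (fun points result =>
      if result == "W" then points + 3
      else if result == "D" then points + 1
      else points) a
      = a + 3 * (form.count "W" : Int) + (form.count "D" : Int) := by
  induction form generalizing a with
  | nil => simp
  | cons x xs ih =>
    simp only [List.foldl_cons, ih, List.count_cons]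
    by_cases hw : x = "W"
    · subst hw; simp; ring
    · by_cases hd : x = "D"
      · subst hd; simp; ring
      · simp [hw, hd]

-- ===== VERDICT =====
theorem calculate_points_spec : Claim_equal_calculate_points := by
  intro form _
  unfold Spec_calculate_points calculate_points calculate_points_alt
  rw [calc_foldl]
  simp [PySem.Dict.getD_foldl_insert_add_one]
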